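-- pv_equiv track=rewrite | github.com/ANANDU-2000/PurchaseAssiastant | backend/app/services/app_assistant_chat.py | _format_missing_fields
-- ===== SOURCE A (Python) =====
-- def _format_missing_fields(fields: list[str] | None) -> str:
--     order = [
--         "item",
--         "item_name",
--         "qty",
--         "unit",
--         "landing_cost",
--         "buy_price",
--         "selling_price",
--         "supplier_name",
--         "broker_name",
--         "entry_date",
--     ]
--     clean = [str(f).strip() for f in (fields or []) if str(f).strip()]
--     if not clean:
--         return "Need: item, qty, landing cost (or selling if applicable)."
--     seen: set[str] = set()
--     dedup = []
--     for f in clean: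
--         if f in seen:
--             continue
--         seen.add(f)
--         dedup.append(f)
--     ranked = sorted(dedup, key=lambda x: order.index(x) if x in order else 999)
--     return "Need: " + ", ".join(ranked) + "."
-- ===== SOURCE B (Python) =====
-- def _format_missing_fields(fields: "list[str] | None") -> str:
--     order = [
--         "item",
--         "item_name",
--         "qty",
--         "unit",
--         "landing_cost",
--         "buy_price",
--         "selling_price",
--         "supplier_name",
--         "broker_name",
--         "entry_date",
--     ]
--     clean = [str(f).strip() for f in (fields or []) if str(f).strip()]
--     if not clean:
--         return "Need: item, qty, landing cost (or selling if applicable)."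
--     dedup = list(dict.fromkeys(clean))
--     known = [f for f in order if f in dedup]
--     extra = [f for f in dedup if f not in order]
--     return "Need: " + ", ".join(known + extra) + "."
-- ===== Notes on version B (the rewrite author's own statement) =====
-- stated objective: simpler
-- what changed: Replaces the seen-set loop plus stable sort with an order.index key (999 sentinel for unknowns) by dict.fromkeys dedup and a two-pass bucket: walk the fixed order list picking present fields, then append unknown fields in first-occurrence order.
import Mathlib
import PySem

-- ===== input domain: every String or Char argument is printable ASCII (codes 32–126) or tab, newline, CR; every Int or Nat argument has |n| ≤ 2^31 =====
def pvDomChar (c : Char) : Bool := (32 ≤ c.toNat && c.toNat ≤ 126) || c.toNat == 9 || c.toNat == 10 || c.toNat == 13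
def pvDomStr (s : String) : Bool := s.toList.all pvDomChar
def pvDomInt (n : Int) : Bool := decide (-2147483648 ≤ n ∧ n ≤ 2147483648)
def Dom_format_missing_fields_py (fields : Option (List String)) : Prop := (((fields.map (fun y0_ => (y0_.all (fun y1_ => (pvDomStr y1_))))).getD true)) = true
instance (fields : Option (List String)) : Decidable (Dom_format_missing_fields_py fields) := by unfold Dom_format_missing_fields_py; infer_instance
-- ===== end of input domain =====

-- B replaces A's seen-set loop + stable sort (key = order.index, 999 for unknowns) by an
-- ordered-dedup and a two-pass bucket over the fixed order list; objective: simpler.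


-- ===== PORT A =====
def pvOrder : List String :=
  ["item", "item_name", "qty", "unit", "landing_cost", "buy_price",
   "selling_price", "supplier_name", "broker_name", "entry_date"]

-- key=lambda x: order.index(x) if x in order else 999
def pvKeyA (x : String) : Int :=
  if x ∈ pvOrder then (((PySem.List.index? pvOrder x).getD 0 : Nat) : Int) else 999

def format_missing_fields_py (fields : Option (List String)) : String :=
  let clean := (fields.getD []).filterMap
    (fun f => let s := PySem.Str.strip f; if s = "" then none else some s)
  if clean = [] then "Need: item, qty, landing cost (or selling if applicable)."
  else
    -- seen: set[str], dedup: list, for f in clean: skip if in seen else add+append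
    let sd := clean.foldl
      (fun (sd : PySem.Set String × List String) f =>
        if PySem.Set.contains sd.1 f then sd else (PySem.Set.add sd.1 f, sd.2 ++ [f]))
      (PySem.Set.empty, [])
    let ranked := PySem.List.sorted sd.2 pvKeyA
    "Need: " ++ PySem.Str.join ", " ranked ++ "."

-- ===== PORT B =====
def format_missing_fields_py_alt (fields : Option (List String)) : String :=
  let clean := (fields.getD []).filterMap
    (fun f => let s := PySem.Str.strip f; if s = "" then none else some s)
  if clean = [] then "Need: item, qty, landing cost (or selling if applicable)."
  else
    let dedup := PySem.List.dedup clean        -- list(dict.fromkeys(clean))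
    let known := pvOrder.filter (fun f => decide (f ∈ dedup))
    let extra := dedup.filter (fun f => !decide (f ∈ pvOrder))
    "Need: " ++ PySem.Str.join ", " (known ++ extra) ++ "."

-- ===== PRECONDITION & SPEC =====
def Spec_format_missing_fields_py (fields : Option (List String)) (out : String) : Prop := out = format_missing_fields_py_alt fields
instance (fields : Option (List String)) (out : String) : Decidable (Spec_format_missing_fields_py fields out) := by unfold Spec_format_missing_fields_py; infer_instance

-- ===== CLAIM (what is proved, stated in full; the proofs are below) =====
def Claim_equal_format_missing_fields_py : Prop := ∀ (fields : Option (List String)), Dom_format_missing_fields_py fields → Spec_format_missing_fields_py fields (format_missing_fields_py fields)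

-- ===== LEMMAS AND PROOFS =====
theorem pv_insertBy_split {α : Type} (before : α → α → Bool) (x : α) (l1 l2 : List α)
    (h1 : ∀ y ∈ l1, before x y = false) (h2 : ∀ y ∈ l2, before x y = true) :
    PySem.List.insertBy before x (l1 ++ l2) = l1 ++ x :: l2 := by
  induction l1 with
  | nil =>
    cases l2 with
    | nil => simp [PySem.List.insertBy]
    | cons y t => simp [PySem.List.insertBy, h2 y (by simp)]
  | cons a l ih =>
    simp [PySem.List.insertBy, h1 a (by simp), ih fun y hy => h1 y (by simp [hy])]

theorem pvKeyA_le (y : String) : pvKeyA y ≤ 999 := by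
  by_cases h : y ∈ pvOrder
  · fin_cases h <;> decide
  · simp [pvKeyA, h]

theorem pvKeyA_mem_lt {x : String} (h : x ∈ pvOrder) : pvKeyA x < 999 := by
  fin_cases h <;> decide

theorem pvKeyA_not_mem {y : String} (h : y ∉ pvOrder) : pvKeyA y = 999 := by
  simp [pvKeyA, h]

theorem pv_filter_mem_append_single {s : List String} {x : String} (l : List String) (hxl : x ∉ l) :
    l.filter (fun y => decide (y ∈ s ++ [x])) = l.filter (fun y => decide (y ∈ s)) := by
  apply List.filter_congr
  intro y hy
  have hne : y ≠ x := fun h => hxl (h ▸ hy)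
  simp [List.mem_append, hne]

theorem pv_step_mem (s : List String) (x : String) (o1 o2 : List String)
    (hx : x ∉ s) (ho : pvOrder = o1 ++ x :: o2) (hx1 : x ∉ o1) (hx2 : x ∉ o2)
    (hxo : x ∈ pvOrder)
    (h1 : ∀ y ∈ o1, decide (pvKeyA x < pvKeyA y) = false)
    (h2 : ∀ y ∈ o2, decide (pvKeyA x < pvKeyA y) = true) :
    PySem.List.insertBy (fun a b => decide (pvKeyA a < pvKeyA b)) x
      (pvOrder.filter (fun y => decide (y ∈ s)) ++ s.filter (fun y => !decide (y ∈ pvOrder)))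
    = pvOrder.filter (fun y => decide (y ∈ s ++ [x]))
        ++ (s ++ [x]).filter (fun y => !decide (y ∈ pvOrder)) := by
  rw [ho]
  have e1 : (o1 ++ x :: o2).filter (fun y => decide (y ∈ s))
      = o1.filter (fun y => decide (y ∈ s)) ++ o2.filter (fun y => decide (y ∈ s)) := by
    rw [List.filter_append, List.filter_cons]
    simp [hx]
  have e2 : (o1 ++ x :: o2).filter (fun y => decide (y ∈ s ++ [x]))
      = o1.filter (fun y => decide (y ∈ s)) ++ x :: o2.filter (fun y => decide (y ∈ s)) := by
    rw [List.filter_append, List.filter_cons,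
      pv_filter_mem_append_single o1 hx1, pv_filter_mem_append_single o2 hx2]
    simp
  have e3 : (s ++ [x]).filter (fun y => !decide (y ∈ o1 ++ x :: o2)) = s.filter (fun y => !decide (y ∈ o1 ++ x :: o2)) := by
    rw [List.filter_append]
    simp [List.filter]
  rw [e1, e2, e3, List.append_assoc]
  rw [pv_insertBy_split _ x (o1.filter (fun y => decide (y ∈ s)))
        (o2.filter (fun y => decide (y ∈ s)) ++ s.filter (fun y => !decide (y ∈ o1 ++ x :: o2)))]
  · simp
  · intro y hy
    exact h1 y (List.mem_of_mem_filter hy)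
  · intro y hy
    rcases List.mem_append.mp hy with hy | hy
    · exact h2 y (List.mem_of_mem_filter hy)
    · have hnot : y ∉ pvOrder := by
        have := (List.mem_filter.mp hy).2
        simpa [ho] using this
      rw [pvKeyA_not_mem hnot]
      simpa using pvKeyA_mem_lt hxo

theorem pv_step (s : List String) (x : String) (hx : x ∉ s) :
    PySem.List.insertBy (fun a b => decide (pvKeyA a < pvKeyA b)) x
      (pvOrder.filter (fun y => decide (y ∈ s)) ++ s.filter (fun y => !decide (y ∈ pvOrder)))
    = pvOrder.filter (fun y => decide (y ∈ s ++ [x]))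
        ++ (s ++ [x]).filter (fun y => !decide (y ∈ pvOrder)) := by
  by_cases hxo : x ∈ pvOrder
  · fin_cases hxo
    · exact pv_step_mem s _ [] ["item_name","qty","unit","landing_cost","buy_price","selling_price","supplier_name","broker_name","entry_date"] hx rfl (by decide) (by decide) (by decide) (by decide) (by decide)
    · exact pv_step_mem s _ ["item"] ["qty","unit","landing_cost","buy_price","selling_price","supplier_name","broker_name","entry_date"] hx rfl (by decide) (by decide) (by decide) (by decide) (by decide)
    · exact pv_step_mem s _ ["item","item_name"] ["unit","landing_cost","buy_price","selling_price","supplier_name","broker_name","entry_date"] hx rfl (by decide) (by decide) (by decide) (by decide) (by decide)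
    · exact pv_step_mem s _ ["item","item_name","qty"] ["landing_cost","buy_price","selling_price","supplier_name","broker_name","entry_date"] hx rfl (by decide) (by decide) (by decide) (by decide) (by decide)
    · exact pv_step_mem s _ ["item","item_name","qty","unit"] ["buy_price","selling_price","supplier_name","broker_name","entry_date"] hx rfl (by decide) (by decide) (by decide) (by decide) (by decide)
    · exact pv_step_mem s _ ["item","item_name","qty","unit","landing_cost"] ["selling_price","supplier_name","broker_name","entry_date"] hx rfl (by decide) (by decide) (by decide) (by decide) (by decide)
    · exact pv_step_mem s _ ["item","item_name","qty","unit","landing_cost","buy_price"] ["supplier_name","broker_name","entry_date"] hx rfl (by decide) (by decide) (by decide) (by decide) (by decide)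
    · exact pv_step_mem s _ ["item","item_name","qty","unit","landing_cost","buy_price","selling_price"] ["broker_name","entry_date"] hx rfl (by decide) (by decide) (by decide) (by decide) (by decide)
    · exact pv_step_mem s _ ["item","item_name","qty","unit","landing_cost","buy_price","selling_price","supplier_name"] ["entry_date"] hx rfl (by decide) (by decide) (by decide) (by decide) (by decide)
    · exact pv_step_mem s _ ["item","item_name","qty","unit","landing_cost","buy_price","selling_price","supplier_name","broker_name"] [] hx rfl (by decide) (by decide) (by decide) (by decide) (by decide)
  · rw [PySem.List.insertBy_of_forall_not_before]
    · rw [pv_filter_mem_append_single pvOrder hxo]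
      rw [List.filter_append (l₁ := s)]
      have : ([x].filter (fun y => !decide (y ∈ pvOrder)) : List String) = [x] := by
        simp [List.filter, hxo]
      rw [this, ← List.append_assoc]
    · intro y hy
      rw [pvKeyA_not_mem hxo]
      rcases List.mem_append.mp hy with hy | hy
      · have := pvKeyA_le y
        simpa using by omega
      · have hnot : y ∉ pvOrder := by simpa using (List.mem_filter.mp hy).2
        rw [pvKeyA_not_mem hnot]
        simp

theorem pv_sorted_eq (d : List String) (hd : d.Nodup) :
    PySem.List.sorted d pvKeyA
      = pvOrder.filter (fun y => decide (y ∈ d)) ++ d.filter (fun y => !decide (y ∈ pvOrder)) := by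
  rw [PySem.List.sorted_eq_foldl_insertBy]
  induction d using List.reverseRecOn with
  | nil => simp
  | append_singleton s x ih =>
    have hx : x ∉ s := by
      intro h
      exact (List.nodup_append.mp hd).2.2 x h x (List.mem_singleton_self x) rfl
    have hs : s.Nodup := (List.nodup_append.mp hd).1
    rw [List.foldl_append, List.foldl_cons, List.foldl_nil, ih hs]
    exact pv_step s x hx

theorem pv_loop (l : List String) (s : PySem.Set String) :
    l.foldl
      (fun (sd : PySem.Set String × List String) f =>
        if PySem.Set.contains sd.1 f then sd else (PySem.Set.add sd.1 f, sd.2 ++ [f]))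
      (s, s)
    = (l.foldl PySem.Set.add s, l.foldl PySem.Set.add s) := by
  induction l generalizing s with
  | nil => rfl
  | cons f t ih =>
    simp only [List.foldl_cons]
    by_cases h : PySem.Set.contains s f
    · have hadd : PySem.Set.add s f = s := by
        have hm : f ∈ s := by simpa using h
        simp [PySem.Set.add, hm]
      rw [if_pos h, hadd]
      exact ih s
    · have hadd : PySem.Set.add s f = s ++ [f] := by
        have hm : f ∉ s := by simpa using h
        simp [PySem.Set.add, hm]
      rw [if_neg h, hadd]
      exact ih (s ++ [f])

-- ===== VERDICT (by name: the statement is the Claim_ definition above) =====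
theorem format_missing_fields_py_spec : Claim_equal_format_missing_fields_py := by
  intro fields _
  unfold Spec_format_missing_fields_py format_missing_fields_py format_missing_fields_py_alt
  set clean := (fields.getD []).filterMap
    (fun f => let s := PySem.Str.strip f; if s = "" then none else some s) with hc
  by_cases h : clean = []
  · simp [h]
  · simp only [if_neg h]
    have hloop := pv_loop clean PySem.Set.empty
    have hd : (clean.foldl
        (fun (sd : PySem.Set String × List String) f =>
          if PySem.Set.contains sd.1 f then sd else (PySem.Set.add sd.1 f, sd.2 ++ [f]))
        (PySem.Set.empty, [])).2 = PySem.List.dedup clean := by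
      rw [show ((PySem.Set.empty : PySem.Set String), ([] : List String))
            = ((PySem.Set.empty : PySem.Set String), (PySem.Set.empty : PySem.Set String)) from rfl]
      rw [hloop]
      rw [PySem.List.dedup_eq_ofList, PySem.Set.ofList_eq_foldl]
      rfl
    rw [hd]
    rw [pv_sorted_eq (PySem.List.dedup clean)
      (by rw [PySem.List.dedup_eq_ofList]; exact PySem.Set.nodup_ofList clean)]
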